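-- pv_equiv track=rewrite | github.com/BugTraceAI/BugTraceAI-CLI | bugtrace/tools/waf/encodings.py | _concat_string
-- ===== SOURCE A (Python) =====
-- def _concat_string(payload: str) -> str:
--     """
--     Break strings using concatenation.
--     'admin' -> 'adm'+'in'
--     SELECT -> SEL'+'ECT
--     """
--     replacements = [
--         ("admin", "adm'+'in"),
--         ("SELECT", "SEL'+'ECT"),
--         ("UNION", "UNI'+'ON"),
--         ("script", "scr'+'ipt"),
--         ("alert", "al'+'ert"),
--         ("onerror", "oner'+'ror"),
--     ]
--     result = payload
--     for original, replacement in replacements: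
--         result = result.replace(original, replacement)
--         result = result.replace(original.lower(), replacement.lower())
--     return result
-- ===== SOURCE B (Python) =====
-- def _concat_string(payload: str) -> str:
--     # One left-to-right scan. On a keyword match, emit its left fragment plus
--     # "'+'" and resume scanning at the keyword's right fragment (so that e.g.
--     # "union" followed by "error" still lets "onerror" be broken, exactly as
--     # the sequential replace passes do).
--     table = [
--         ("admin", "adm"), ("SELECT", "SEL"), ("select", "sel"),
--         ("UNION", "UNI"), ("union", "uni"), ("script", "scr"),
--         ("alert", "al"), ("onerror", "oner"),
--     ]
--     out = []
--     i = 0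
--     n = len(payload)
--     while i < n:
--         for kw, left in table:
--             if payload.startswith(kw, i):
--                 out.append(left + "'+'")
--                 i += len(left)
--                 break
--         else:
--             out.append(payload[i])
--             i += 1
--     return "".join(out)
-- ===== Notes on version B (the rewrite author's own statement) =====
-- stated objective: alternative
-- what changed: Replaces A's six sequential pairs of full-string str.replace passes by a single left-to-right table-driven scan that, on each keyword match, emits the keyword's left fragment followed by the quote-plus-quote infix and resumes scanning at the keyword's right fragment (which reproduces exactly the union-then-onerror interaction of A's sequential passes).
import Mathlib
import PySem

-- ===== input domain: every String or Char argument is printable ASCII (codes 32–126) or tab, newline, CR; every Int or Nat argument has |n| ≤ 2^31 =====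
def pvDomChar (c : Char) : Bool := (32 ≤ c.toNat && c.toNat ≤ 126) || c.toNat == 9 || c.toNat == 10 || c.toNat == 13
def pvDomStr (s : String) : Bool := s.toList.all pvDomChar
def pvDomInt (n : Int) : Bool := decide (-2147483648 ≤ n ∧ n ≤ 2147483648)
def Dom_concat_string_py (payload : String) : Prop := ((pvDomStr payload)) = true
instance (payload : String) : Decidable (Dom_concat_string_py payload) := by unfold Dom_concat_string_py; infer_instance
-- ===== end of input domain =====

-- B replaces A's six sequential pairs of full-string replace passes by one left-to-right
-- table-driven scan (emit left fragment + "'+'", resume at the right fragment); alternative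
-- decomposition, same return value on every input.


-- ===== PORT A =====
def pvReplacements : List (String × String) :=
  [("admin", "adm'+'in"), ("SELECT", "SEL'+'ECT"), ("UNION", "UNI'+'ON"),
   ("script", "scr'+'ipt"), ("alert", "al'+'ert"), ("onerror", "oner'+'ror")]

def concat_string_py (payload : String) : String :=
  pvReplacements.foldl
    (fun result pr =>
      let r1 := PySem.Str.replace result pr.1 pr.2
      PySem.Str.replace r1 (PySem.Str.lower pr.1) (PySem.Str.lower pr.2))
    payload

-- ===== PORT B =====
def pvTable : List (List Char × List Char) :=
  [("admin".toList, "adm".toList), ("SELECT".toList, "SEL".toList), ("select".toList, "sel".toList),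
   ("UNION".toList, "UNI".toList), ("union".toList, "uni".toList), ("script".toList, "scr".toList),
   ("alert".toList, "al".toList), ("onerror".toList, "oner".toList)]

lemma pvTable_left_pos : ∀ p ∈ pvTable, 0 < p.2.length := by decide

def scanB : List Char → List Char
  | [] => []
  | c :: t =>
    match h : pvTable.find? (fun p => p.1.isPrefixOf (c :: t)) with
    | some p => p.2 ++ "'+'".toList ++ scanB ((c :: t).drop p.2.length)
    | none => c :: scanB t
termination_by l => l.length
decreasing_by
  · have hm := pvTable_left_pos _ (List.mem_of_find?_eq_some h)
    simp only [List.length_drop, List.length_cons]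
    omega
  · simp

def concat_string_py_alt (payload : String) : String :=
  String.ofList (scanB payload.toList)

-- ===== PRECONDITION & SPEC =====
def Spec_concat_string_py (payload : String) (out : String) : Prop := out = concat_string_py_alt payload
instance (payload : String) (out : String) : Decidable (Spec_concat_string_py payload out) := by unfold Spec_concat_string_py; infer_instance

-- ===== CLAIM (what is proved, stated in full; the proofs are below) =====
def Claim_equal_concat_string_py : Prop := ∀ (payload : String), Dom_concat_string_py payload → Spec_concat_string_py payload (concat_string_py payload)

-- ===== LEMMAS AND PROOFS =====

lemma go_acc (old new : List Char) : ∀ (fuel : Nat) (l acc : List Char),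
    PySem.Chars.replace.go old new fuel l acc = acc.reverse ++ PySem.Chars.replace.go old new fuel l [] := by
  intro fuel
  induction fuel with
  | zero => intro l acc; rw [PySem.Chars.replace.go.eq_def, PySem.Chars.replace.go.eq_def]; simp
  | succ n ih =>
    intro l acc
    cases l with
    | nil => rw [PySem.Chars.replace.go.eq_def, PySem.Chars.replace.go.eq_def]; simp
    | cons c t =>
      rw [PySem.Chars.replace.go.eq_def]
      conv_rhs => rw [PySem.Chars.replace.go.eq_def]
      by_cases hp : old.isPrefixOf (c :: t) = true
      · simp only [hp, if_true]
        rw [ih _ (new.reverse ++ acc),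
          show PySem.Chars.replace.go old new n (List.drop old.length (c :: t)) (new.reverse ++ []) =
            (new.reverse ++ []).reverse ++ PySem.Chars.replace.go old new n (List.drop old.length (c :: t)) [] from ih _ _]
        simp
      · simp only [hp, if_false, Bool.false_eq_true]
        rw [ih t (c :: acc),
          show PySem.Chars.replace.go old new n t [c] = [c].reverse ++ PySem.Chars.replace.go old new n t [] from ih _ _]
        simp

lemma go_fuel (old new : List Char) (hold : old ≠ []) : ∀ (f1 : Nat) (l : List Char) (f2 : Nat),
    l.length ≤ f1 → l.length ≤ f2 →
    PySem.Chars.replace.go old new f1 l [] = PySem.Chars.replace.go old new f2 l [] := by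
  intro f1
  induction f1 with
  | zero =>
    intro l f2 h1 _
    have : l = [] := by cases l <;> simp_all
    subst this
    rw [PySem.Chars.replace.go.eq_def, PySem.Chars.replace.go.eq_def]
    cases f2 <;> simp
  | succ n ih =>
    intro l f2 h1 h2
    cases l with
    | nil =>
      rw [PySem.Chars.replace.go.eq_def, PySem.Chars.replace.go.eq_def]
      cases f2 <;> simp
    | cons c t =>
      cases f2 with
      | zero => simp at h2
      | succ m =>
        simp only [List.length_cons] at h1 h2
        have hol : 1 ≤ old.length := by cases old <;> simp_all
        rw [PySem.Chars.replace.go.eq_def]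
        conv_rhs => rw [PySem.Chars.replace.go.eq_def]
        by_cases hp : old.isPrefixOf (c :: t) = true
        · simp only [hp, if_true]
          rw [go_acc, go_acc old new m]
          rw [ih _ m (by simp only [List.length_drop, List.length_cons]; omega)
            (by simp only [List.length_drop, List.length_cons]; omega)]
        · simp only [hp, if_false, Bool.false_eq_true]
          rw [go_acc, go_acc old new m]
          rw [ih t m (by omega) (by omega)]

lemma isEmpty_false_of_ne_nil (old : List Char) (hold : old ≠ []) : old.isEmpty = false := by
  cases old <;> simp_all

lemma replace_nil (old new : List Char) (hold : old ≠ []) : PySem.Chars.replace [] old new = [] := by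
  rw [PySem.Chars.replace.eq_def]
  simp [isEmpty_false_of_ne_nil old hold, PySem.Chars.replace.go.eq_def]

lemma replace_cons (old new : List Char) (hold : old ≠ []) (c : Char) (t : List Char) :
    PySem.Chars.replace (c :: t) old new =
      if old.isPrefixOf (c :: t) = true then new ++ PySem.Chars.replace ((c :: t).drop old.length) old new
      else c :: PySem.Chars.replace t old new := by
  rw [PySem.Chars.replace.eq_def]
  simp only [isEmpty_false_of_ne_nil old hold, if_false, Bool.false_eq_true]
  rw [PySem.Chars.replace.go.eq_def]
  simp only [List.length_cons]
  have hol : 1 ≤ old.length := by cases old <;> simp_all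
  by_cases hp : old.isPrefixOf (c :: t) = true
  · simp only [hp, if_true]
    rw [go_acc]
    rw [go_fuel old new hold t.length ((c :: t).drop old.length) ((c :: t).drop old.length).length
      (by simp only [List.length_drop, List.length_cons]; omega) le_rfl]
    rw [PySem.Chars.replace.eq_def]
    simp [isEmpty_false_of_ne_nil old hold]
  · simp only [hp, if_false, Bool.false_eq_true]
    rw [go_acc]
    rw [PySem.Chars.replace.eq_def]
    simp [isEmpty_false_of_ne_nil old hold]

-- mismatch within the concrete part ⇒ never a prefix, whatever follows
def misB (p s : List Char) : Bool :=
  (List.range (min p.length s.length)).any (fun j => p[j]? != s[j]?)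

lemma not_prefixOf_of_misB (p s : List Char) (h : misB p s = true) (Y : List Char) :
    p.isPrefixOf (s ++ Y) = false := by
  by_contra hcon
  have hpre : p <+: s ++ Y := by
    rw [← List.isPrefixOf_iff_prefix]
    cases hpp : p.isPrefixOf (s ++ Y) <;> simp_all
  obtain ⟨r, hr⟩ := hpre
  obtain ⟨j, hj, hne⟩ : ∃ j, j < min p.length s.length ∧ p[j]? ≠ s[j]? := by
    simpa [misB, List.any_eq_true] using h
  have hj1 : j < p.length := by omega
  have hj2 : j < s.length := by omega
  have e1 : (p ++ r)[j]? = p[j]? := List.getElem?_append_left hj1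
  have e2 : (s ++ Y)[j]? = s[j]? := List.getElem?_append_left hj2
  rw [hr] at e1
  exact hne (by rw [← e1, e2])

lemma replace_append (old new : List Char) (hold : old ≠ []) (E : List Char)
    (hm : ∀ i < E.length, misB old (E.drop i) = true) :
    ∀ Y, PySem.Chars.replace (E ++ Y) old new = E ++ PySem.Chars.replace Y old new := by
  induction E with
  | nil => intro Y; simp
  | cons c E' ih =>
    intro Y
    rw [List.cons_append, replace_cons old new hold]
    have h0 : misB old ((c :: E').drop 0) = true := hm 0 (by simp)
    simp only [List.drop_zero] at h0
    have hnp := not_prefixOf_of_misB old (c :: E') h0 Y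
    rw [List.cons_append] at hnp
    rw [hnp]
    simp only [Bool.false_eq_true, if_false]
    rw [ih (fun i hi => by simpa using hm (i + 1) (by simp; omega))]
    simp

-- the chain of replace passes (A's algorithm on List Char)
def chainR : List (List Char × List Char) → List Char → List Char
  | [], l => l
  | pr :: ps, l => chainR ps (PySem.Chars.replace l pr.1 pr.2)

lemma chainR_commute (ps : List (List Char × List Char)) (E : List Char)
    (h : ∀ pr ∈ ps, pr.1 ≠ [] ∧ ∀ i < E.length, misB pr.1 (E.drop i) = true) :
    ∀ Y, chainR ps (E ++ Y) = E ++ chainR ps Y := by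
  induction ps with
  | nil => intro Y; simp [chainR]
  | cons pr ps ih =>
    intro Y
    have hpr := h pr (by simp)
    simp only [chainR]
    rw [replace_append pr.1 pr.2 hpr.1 E hpr.2 Y]
    exact ih (fun q hq => h q (by simp [hq])) _

-- quote-free prefixes of a replace result were already prefixes of the input
lemma prefix_transfer (old lft rr : List Char) (hold : old ≠ []) (hlft : lft <+: old) :
    ∀ (n : Nat) (l : List Char), l.length ≤ n → ∀ w, '\'' ∉ w →
      w <+: PySem.Chars.replace l old (lft ++ '\'' :: rr) → w <+: l := by
  intro n
  induction n with
  | zero =>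
    intro l hl w hw hpre
    have : l = [] := by cases l <;> simp_all
    subst this
    rwa [replace_nil old _ hold] at hpre
  | succ n ih =>
    intro l hl w hw hpre
    cases l with
    | nil => rwa [replace_nil old _ hold] at hpre
    | cons c t =>
      rw [replace_cons old _ hold] at hpre
      by_cases hp : old.isPrefixOf (c :: t) = true
      · simp only [hp, if_true] at hpre
        have hwl : w.length ≤ lft.length := by
          by_contra hgt
          push Not at hgt
          obtain ⟨r, hr⟩ := hpre
          have e2 : w[lft.length]? = some '\'' := by
            rw [← List.getElem?_append_left (l₂ := r) hgt, hr, List.append_assoc,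
              List.getElem?_append_right (le_refl lft.length)]
            simp
          exact hw (List.mem_of_getElem? e2)
        have hwlft : w <+: lft :=
          List.prefix_of_prefix_length_le hpre
            ((List.prefix_append lft _).trans (List.prefix_append _ _)) hwl
        have hwold : w <+: old := hwlft.trans hlft
        have holdl : old <+: c :: t := by rwa [← List.isPrefixOf_iff_prefix]
        exact hwold.trans holdl
      · simp only [hp, if_false, Bool.false_eq_true] at hpre
        cases w with
        | nil => exact List.nil_prefix
        | cons a w' =>
          rw [List.cons_prefix_cons] at hpre ⊢
          refine ⟨hpre.1, ?_⟩
          exact ih t (by simp at hl; omega) w' (by simp at hw; tauto) hpre.2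

-- shape check for a (pattern, replacement) pair: replacement = lft ++ '\'' :: rr with lft a prefix of the pattern
def shapeB (old new : List Char) : Bool :=
  (new.takeWhile (fun c => c ≠ '\'')).isPrefixOf old &&
    ((new.dropWhile (fun c => c ≠ '\'')).head? == some '\'')

lemma shapeB_spec (old new : List Char) (h : shapeB old new = true) :
    ∃ lft rr, lft <+: old ∧ new = lft ++ '\'' :: rr := by
  simp only [shapeB, Bool.and_eq_true, beq_iff_eq] at h
  obtain ⟨h1, h2⟩ := h
  cases hdw : new.dropWhile (fun c => c ≠ '\'') with
  | nil => rw [hdw] at h2; simp at h2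
  | cons a l =>
    rw [hdw] at h2
    simp only [List.head?_cons, Option.some.injEq] at h2
    subst h2
    refine ⟨new.takeWhile (fun c => c ≠ '\''), l, ?_, ?_⟩
    · rwa [← List.isPrefixOf_iff_prefix]
    · conv_lhs => rw [← List.takeWhile_append_dropWhile (p := fun c => c ≠ '\'') (l := new)]
      rw [hdw]

lemma chainR_nomatch (kws : List (List Char)) (ps : List (List Char × List Char)) (c : Char)
    (t : List Char)
    (hps : ∀ pr ∈ ps, pr.1 ∈ kws ∧ pr.1 ≠ [] ∧ '\'' ∉ pr.1 ∧ shapeB pr.1 pr.2 = true)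
    (hkw : ∀ k ∈ kws, k.isPrefixOf (c :: t) = false) :
    ∀ u, (∀ w, '\'' ∉ w → w <+: u → w <+: t) →
      chainR ps (c :: u) = c :: chainR ps u := by
  induction ps with
  | nil => intro u _; simp [chainR]
  | cons pr ps ih =>
    intro u htr
    obtain ⟨hk, hne, hq, hsh⟩ := hps pr (by simp)
    have hnp : pr.1.isPrefixOf (c :: u) = false := by
      cases hb : pr.1.isPrefixOf (c :: u) with
      | false => rfl
      | true =>
        exfalso
        have hpre : pr.1 <+: c :: u := by rwa [← List.isPrefixOf_iff_prefix]
        cases hp1 : pr.1 with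
        | nil => exact hne hp1
        | cons a o =>
          rw [hp1] at hpre
          rw [List.cons_prefix_cons] at hpre
          have hot : o <+: t := htr o (by rw [hp1] at hq; simp at hq; tauto) hpre.2
          have hpt : pr.1 <+: c :: t := by rw [hp1, hpre.1, List.cons_prefix_cons]; exact ⟨rfl, hot⟩
          have hpt' : pr.1.isPrefixOf (c :: t) = true := by rwa [List.isPrefixOf_iff_prefix]
          rw [hkw pr.1 hk] at hpt'
          exact Bool.false_ne_true hpt'
    simp only [chainR]
    rw [replace_cons pr.1 pr.2 hne c u, hnp]
    simp only [Bool.false_eq_true, if_false]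
    obtain ⟨lft, rr, hlft, hrepl⟩ := shapeB_spec pr.1 pr.2 hsh
    refine ih (fun q hq => hps q (by simp [hq])) (PySem.Chars.replace u pr.1 pr.2) ?_
    intro w hw hwp
    refine htr w hw ?_
    rw [hrepl] at hwp
    exact prefix_transfer pr.1 lft rr hne hlft u.length u le_rfl w hw hwp

lemma chainR_append (ps₁ ps₂ : List (List Char × List Char)) (l : List Char) :
    chainR (ps₁ ++ ps₂) l = chainR ps₂ (chainR ps₁ l) := by
  induction ps₁ generalizing l with
  | nil => simp [chainR]
  | cons pr ps ih => simp only [List.cons_append, chainR]; exact ih _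

lemma replace_match (old new X : List Char) (hold : old ≠ []) :
    PySem.Chars.replace (old ++ X) old new = new ++ PySem.Chars.replace X old new := by
  cases hol : old with
  | nil => exact absurd hol hold
  | cons a o =>
    rw [← hol, show old ++ X = old.head hold :: (old.tail ++ X) by
      cases old with | nil => exact absurd rfl hold | cons b u => simp]
    rw [replace_cons old new hold]
    have hpre : old.isPrefixOf (old.head hold :: (old.tail ++ X)) = true := by
      rw [List.isPrefixOf_iff_prefix]
      have : old.head hold :: (old.tail ++ X) = old ++ X := by
        cases old with | nil => exact absurd rfl hold | cons b u => simp
      rw [this]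
      exact List.prefix_append _ _
    rw [hpre]
    simp only [if_true]
    congr 1
    have : old.head hold :: (old.tail ++ X) = old ++ X := by
      cases old with | nil => exact absurd rfl hold | cons b u => simp
    rw [this, List.drop_left]

lemma chainR_split (ps₁ ps₂ : List (List Char × List Char)) (old new E rr t : List Char)
    (hold : old ≠ []) (hnew : new = E ++ rr)
    (hc₁ : ∀ pr ∈ ps₁, pr.1 ≠ [] ∧ ∀ i < old.length, misB pr.1 (old.drop i) = true)
    (hc₂ : ∀ pr ∈ ps₂, pr.1 ≠ [] ∧ ∀ i < E.length, misB pr.1 (E.drop i) = true)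
    (hc₃ : ∀ pr ∈ ps₁, pr.1 ≠ [] ∧ ∀ i < rr.length, misB pr.1 (rr.drop i) = true)
    (h₄ : ∀ i < rr.length, misB old (rr.drop i) = true) :
    chainR (ps₁ ++ (old, new) :: ps₂) (old ++ t) = E ++ chainR (ps₁ ++ (old, new) :: ps₂) (rr ++ t) := by
  rw [chainR_append, chainR_append]
  simp only [chainR]
  rw [chainR_commute ps₁ old hc₁ t, chainR_commute ps₁ rr hc₃ t]
  rw [replace_match old new (chainR ps₁ t) hold]
  rw [replace_append old new hold rr h₄ (chainR ps₁ t)]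
  rw [hnew, List.append_assoc]
  rw [chainR_commute ps₂ E hc₂ _]


def passesA : List (List Char × List Char) :=
  [("admin".toList, "adm'+'in".toList), ("admin".toList, "adm'+'in".toList),
   ("SELECT".toList, "SEL'+'ECT".toList), ("select".toList, "sel'+'ect".toList),
   ("UNION".toList, "UNI'+'ON".toList), ("union".toList, "uni'+'on".toList),
   ("script".toList, "scr'+'ipt".toList), ("script".toList, "scr'+'ipt".toList),
   ("alert".toList, "al'+'ert".toList), ("alert".toList, "al'+'ert".toList),
   ("onerror".toList, "oner'+'ror".toList), ("onerror".toList, "oner'+'ror".toList)]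

def kwsL : List (List Char) :=
  ["admin".toList, "SELECT".toList, "select".toList, "UNION".toList,
   "union".toList, "script".toList, "alert".toList, "onerror".toList]

lemma portA_eq_chain (p : String) : (concat_string_py p).toList = chainR passesA p.toList := by
  simp only [concat_string_py, pvReplacements, List.foldl, passesA, chainR,
    PySem.Str.toList_replace, PySem.Str.toList_lower,
    show PySem.Chars.lower ("admin".toList) = "admin".toList from by decide,
    show PySem.Chars.lower ("adm'+'in".toList) = "adm'+'in".toList from by decide,
    show PySem.Chars.lower ("SELECT".toList) = "select".toList from by decide,
    show PySem.Chars.lower ("SEL'+'ECT".toList) = "sel'+'ect".toList from by decide,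
    show PySem.Chars.lower ("UNION".toList) = "union".toList from by decide,
    show PySem.Chars.lower ("UNI'+'ON".toList) = "uni'+'on".toList from by decide,
    show PySem.Chars.lower ("script".toList) = "script".toList from by decide,
    show PySem.Chars.lower ("scr'+'ipt".toList) = "scr'+'ipt".toList from by decide,
    show PySem.Chars.lower ("alert".toList) = "alert".toList from by decide,
    show PySem.Chars.lower ("al'+'ert".toList) = "al'+'ert".toList from by decide,
    show PySem.Chars.lower ("onerror".toList) = "onerror".toList from by decide,
    show PySem.Chars.lower ("oner'+'ror".toList) = "oner'+'ror".toList from by decide]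

lemma chainR_nil (ps : List (List Char × List Char)) (h : ∀ pr ∈ ps, pr.1 ≠ []) :
    chainR ps [] = [] := by
  induction ps with
  | nil => rfl
  | cons pr ps ih =>
    simp only [chainR]
    rw [replace_nil _ _ (h pr (by simp))]
    exact ih (fun q hq => h q (by simp [hq]))

lemma not_prefixOf_of_other (k k' s : List Char) (h1 : ¬ k' <+: k) (h2 : ¬ k <+: k')
    (hk : k <+: s) : k'.isPrefixOf s = false := by
  cases hb : k'.isPrefixOf s with
  | false => rfl
  | true =>
    exfalso
    have hk' : k' <+: s := by rwa [← List.isPrefixOf_iff_prefix]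
    rcases le_total k'.length k.length with hle | hle
    · exact h1 (List.prefix_of_prefix_length_le hk' hk hle)
    · exact h2 (List.prefix_of_prefix_length_le hk hk' hle)

lemma match_step (c : Char) (t t' k new E rr : List Char) (ps₁ ps₂ : List (List Char × List Char))
    (hsplit : passesA = ps₁ ++ (k, new) :: ps₂)
    (hk : c :: t = k ++ t')
    (hold : k ≠ []) (hnew : new = E ++ rr)
    (hc₁ : ∀ pr ∈ ps₁, pr.1 ≠ [] ∧ ∀ i < k.length, misB pr.1 (k.drop i) = true)
    (hc₂ : ∀ pr ∈ ps₂, pr.1 ≠ [] ∧ ∀ i < E.length, misB pr.1 (E.drop i) = true)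
    (hc₃ : ∀ pr ∈ ps₁, pr.1 ≠ [] ∧ ∀ i < rr.length, misB pr.1 (rr.drop i) = true)
    (h₄ : ∀ i < rr.length, misB k (rr.drop i) = true) :
    chainR passesA (c :: t) = E ++ chainR passesA (rr ++ t') := by
  rw [hk, hsplit]
  exact chainR_split ps₁ ps₂ k new E rr t' hold hnew hc₁ hc₂ hc₃ h₄


lemma scanB_eval (c : Char) (t t' k left : List Char)
    (hk : c :: t = k ++ t') (hlen : left.length ≤ k.length)
    (hf : pvTable.find? (fun p => p.1.isPrefixOf (c :: t)) = some (k, left)) :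
    scanB (c :: t) = left ++ "'+'".toList ++ scanB (k.drop left.length ++ t') := by
  rw [scanB.eq_def]
  split
  · rename_i hp
    simp at hp
  · rename_i x c' t'' hp
    cases hp
    split
    · rename_i p hp2
      rw [hf] at hp2
      cases hp2
      rw [hk, List.drop_append_of_le_length hlen]
    · rename_i hp2
      rw [hf] at hp2
      cases hp2

lemma find_admin (c : Char) (t t' : List Char) (hk : c :: t = "admin".toList ++ t') :
    pvTable.find? (fun p => p.1.isPrefixOf (c :: t)) = some ("admin".toList, "adm".toList) := by
  have hpre : "admin".toList <+: c :: t := ⟨t', hk.symm⟩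
  simp only [pvTable, List.find?_cons,
    List.isPrefixOf_iff_prefix.mpr hpre]

lemma find_SELECT (c : Char) (t t' : List Char) (hk : c :: t = "SELECT".toList ++ t') :
    pvTable.find? (fun p => p.1.isPrefixOf (c :: t)) = some ("SELECT".toList, "SEL".toList) := by
  have hpre : "SELECT".toList <+: c :: t := ⟨t', hk.symm⟩
  simp only [pvTable, List.find?_cons,
    not_prefixOf_of_other "SELECT".toList "admin".toList _ (by decide) (by decide) hpre,
    List.isPrefixOf_iff_prefix.mpr hpre]

lemma find_select (c : Char) (t t' : List Char) (hk : c :: t = "select".toList ++ t') :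
    pvTable.find? (fun p => p.1.isPrefixOf (c :: t)) = some ("select".toList, "sel".toList) := by
  have hpre : "select".toList <+: c :: t := ⟨t', hk.symm⟩
  simp only [pvTable, List.find?_cons,
    not_prefixOf_of_other "select".toList "admin".toList _ (by decide) (by decide) hpre,
    not_prefixOf_of_other "select".toList "SELECT".toList _ (by decide) (by decide) hpre,
    List.isPrefixOf_iff_prefix.mpr hpre]

lemma find_UNION (c : Char) (t t' : List Char) (hk : c :: t = "UNION".toList ++ t') :
    pvTable.find? (fun p => p.1.isPrefixOf (c :: t)) = some ("UNION".toList, "UNI".toList) := by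
  have hpre : "UNION".toList <+: c :: t := ⟨t', hk.symm⟩
  simp only [pvTable, List.find?_cons,
    not_prefixOf_of_other "UNION".toList "admin".toList _ (by decide) (by decide) hpre,
    not_prefixOf_of_other "UNION".toList "SELECT".toList _ (by decide) (by decide) hpre,
    not_prefixOf_of_other "UNION".toList "select".toList _ (by decide) (by decide) hpre,
    List.isPrefixOf_iff_prefix.mpr hpre]

lemma find_union (c : Char) (t t' : List Char) (hk : c :: t = "union".toList ++ t') :
    pvTable.find? (fun p => p.1.isPrefixOf (c :: t)) = some ("union".toList, "uni".toList) := by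
  have hpre : "union".toList <+: c :: t := ⟨t', hk.symm⟩
  simp only [pvTable, List.find?_cons,
    not_prefixOf_of_other "union".toList "admin".toList _ (by decide) (by decide) hpre,
    not_prefixOf_of_other "union".toList "SELECT".toList _ (by decide) (by decide) hpre,
    not_prefixOf_of_other "union".toList "select".toList _ (by decide) (by decide) hpre,
    not_prefixOf_of_other "union".toList "UNION".toList _ (by decide) (by decide) hpre,
    List.isPrefixOf_iff_prefix.mpr hpre]

lemma find_script (c : Char) (t t' : List Char) (hk : c :: t = "script".toList ++ t') :
    pvTable.find? (fun p => p.1.isPrefixOf (c :: t)) = some ("script".toList, "scr".toList) := by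
  have hpre : "script".toList <+: c :: t := ⟨t', hk.symm⟩
  simp only [pvTable, List.find?_cons,
    not_prefixOf_of_other "script".toList "admin".toList _ (by decide) (by decide) hpre,
    not_prefixOf_of_other "script".toList "SELECT".toList _ (by decide) (by decide) hpre,
    not_prefixOf_of_other "script".toList "select".toList _ (by decide) (by decide) hpre,
    not_prefixOf_of_other "script".toList "UNION".toList _ (by decide) (by decide) hpre,
    not_prefixOf_of_other "script".toList "union".toList _ (by decide) (by decide) hpre,
    List.isPrefixOf_iff_prefix.mpr hpre]

lemma find_alert (c : Char) (t t' : List Char) (hk : c :: t = "alert".toList ++ t') :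
    pvTable.find? (fun p => p.1.isPrefixOf (c :: t)) = some ("alert".toList, "al".toList) := by
  have hpre : "alert".toList <+: c :: t := ⟨t', hk.symm⟩
  simp only [pvTable, List.find?_cons,
    not_prefixOf_of_other "alert".toList "admin".toList _ (by decide) (by decide) hpre,
    not_prefixOf_of_other "alert".toList "SELECT".toList _ (by decide) (by decide) hpre,
    not_prefixOf_of_other "alert".toList "select".toList _ (by decide) (by decide) hpre,
    not_prefixOf_of_other "alert".toList "UNION".toList _ (by decide) (by decide) hpre,
    not_prefixOf_of_other "alert".toList "union".toList _ (by decide) (by decide) hpre,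
    not_prefixOf_of_other "alert".toList "script".toList _ (by decide) (by decide) hpre,
    List.isPrefixOf_iff_prefix.mpr hpre]

lemma find_onerror (c : Char) (t t' : List Char) (hk : c :: t = "onerror".toList ++ t') :
    pvTable.find? (fun p => p.1.isPrefixOf (c :: t)) = some ("onerror".toList, "oner".toList) := by
  have hpre : "onerror".toList <+: c :: t := ⟨t', hk.symm⟩
  simp only [pvTable, List.find?_cons,
    not_prefixOf_of_other "onerror".toList "admin".toList _ (by decide) (by decide) hpre,
    not_prefixOf_of_other "onerror".toList "SELECT".toList _ (by decide) (by decide) hpre,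
    not_prefixOf_of_other "onerror".toList "select".toList _ (by decide) (by decide) hpre,
    not_prefixOf_of_other "onerror".toList "UNION".toList _ (by decide) (by decide) hpre,
    not_prefixOf_of_other "onerror".toList "union".toList _ (by decide) (by decide) hpre,
    not_prefixOf_of_other "onerror".toList "script".toList _ (by decide) (by decide) hpre,
    not_prefixOf_of_other "onerror".toList "alert".toList _ (by decide) (by decide) hpre,
    List.isPrefixOf_iff_prefix.mpr hpre]

lemma find_none (c : Char) (t : List Char) (h : ∀ k ∈ kwsL, k.isPrefixOf (c :: t) = false) :
    pvTable.find? (fun p => p.1.isPrefixOf (c :: t)) = none := by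
  simp only [pvTable, List.find?_cons,
    h "admin".toList (by decide), h "SELECT".toList (by decide), h "select".toList (by decide),
    h "UNION".toList (by decide), h "union".toList (by decide), h "script".toList (by decide),
    h "alert".toList (by decide), h "onerror".toList (by decide), List.find?_nil]

lemma scanB_nomatch (c : Char) (t : List Char)
    (hf : pvTable.find? (fun p => p.1.isPrefixOf (c :: t)) = none) :
    scanB (c :: t) = c :: scanB t := by
  rw [scanB.eq_def]
  split
  · rename_i hp
    simp at hp
  · rename_i x c' t'' hp
    cases hp
    split
    · rename_i p hp2
      rw [hf] at hp2
      cases hp2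
    · rfl

lemma chain_eq_scan : ∀ (n : Nat) (l : List Char), l.length ≤ n → chainR passesA l = scanB l := by
  intro n
  induction n with
  | zero =>
    intro l hl
    have : l = [] := by cases l <;> simp_all
    subst this
    rw [chainR_nil passesA (by decide), scanB.eq_def]
  | succ n ih =>
    intro l hl
    cases l with
    | nil => rw [chainR_nil passesA (by decide), scanB.eq_def]
    | cons c t =>
      simp only [List.length_cons] at hl
      by_cases h_admin : ("admin".toList).isPrefixOf (c :: t) = true
      · have hpre : "admin".toList <+: c :: t := by rwa [← List.isPrefixOf_iff_prefix]
        obtain ⟨t', ht'⟩ := hpre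
        have hk : c :: t = "admin".toList ++ t' := ht'.symm
        rw [match_step c t t' "admin".toList "adm'+'in".toList "adm'+'".toList "in".toList
          (passesA.take 0) (passesA.drop 1) rfl hk (by decide) rfl (by decide) (by decide) (by decide) (by decide)]
        rw [ih ("in".toList ++ t') (by
          have hlen := congrArg List.length hk
          simp only [List.length_cons, List.length_append] at hlen ⊢
          have e1 : ("admin".toList).length = 5 := by decide
          have e2 : ("in".toList).length = 2 := by decide
          rw [e1] at hlen
          rw [e2]
          omega)]
        rw [scanB_eval c t t' "admin".toList "adm".toList hk (by decide) (find_admin c t t' hk)]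
        rfl
      ·
        by_cases h_SELECT : ("SELECT".toList).isPrefixOf (c :: t) = true
        · have hpre : "SELECT".toList <+: c :: t := by rwa [← List.isPrefixOf_iff_prefix]
          obtain ⟨t', ht'⟩ := hpre
          have hk : c :: t = "SELECT".toList ++ t' := ht'.symm
          rw [match_step c t t' "SELECT".toList "SEL'+'ECT".toList "SEL'+'".toList "ECT".toList
            (passesA.take 2) (passesA.drop 3) rfl hk (by decide) rfl (by decide) (by decide) (by decide) (by decide)]
          rw [ih ("ECT".toList ++ t') (by
            have hlen := congrArg List.length hk
            simp only [List.length_cons, List.length_append] at hlen ⊢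
            have e1 : ("SELECT".toList).length = 6 := by decide
            have e2 : ("ECT".toList).length = 3 := by decide
            rw [e1] at hlen
            rw [e2]
            omega)]
          rw [scanB_eval c t t' "SELECT".toList "SEL".toList hk (by decide) (find_SELECT c t t' hk)]
          rfl
        ·
          by_cases h_select : ("select".toList).isPrefixOf (c :: t) = true
          · have hpre : "select".toList <+: c :: t := by rwa [← List.isPrefixOf_iff_prefix]
            obtain ⟨t', ht'⟩ := hpre
            have hk : c :: t = "select".toList ++ t' := ht'.symm
            rw [match_step c t t' "select".toList "sel'+'ect".toList "sel'+'".toList "ect".toList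
              (passesA.take 3) (passesA.drop 4) rfl hk (by decide) rfl (by decide) (by decide) (by decide) (by decide)]
            rw [ih ("ect".toList ++ t') (by
              have hlen := congrArg List.length hk
              simp only [List.length_cons, List.length_append] at hlen ⊢
              have e1 : ("select".toList).length = 6 := by decide
              have e2 : ("ect".toList).length = 3 := by decide
              rw [e1] at hlen
              rw [e2]
              omega)]
            rw [scanB_eval c t t' "select".toList "sel".toList hk (by decide) (find_select c t t' hk)]
            rfl
          ·
            by_cases h_UNION : ("UNION".toList).isPrefixOf (c :: t) = true
            · have hpre : "UNION".toList <+: c :: t := by rwa [← List.isPrefixOf_iff_prefix]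
              obtain ⟨t', ht'⟩ := hpre
              have hk : c :: t = "UNION".toList ++ t' := ht'.symm
              rw [match_step c t t' "UNION".toList "UNI'+'ON".toList "UNI'+'".toList "ON".toList
                (passesA.take 4) (passesA.drop 5) rfl hk (by decide) rfl (by decide) (by decide) (by decide) (by decide)]
              rw [ih ("ON".toList ++ t') (by
                have hlen := congrArg List.length hk
                simp only [List.length_cons, List.length_append] at hlen ⊢
                have e1 : ("UNION".toList).length = 5 := by decide
                have e2 : ("ON".toList).length = 2 := by decide
                rw [e1] at hlen
                rw [e2]
                omega)]
              rw [scanB_eval c t t' "UNION".toList "UNI".toList hk (by decide) (find_UNION c t t' hk)]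
              rfl
            ·
              by_cases h_union : ("union".toList).isPrefixOf (c :: t) = true
              · have hpre : "union".toList <+: c :: t := by rwa [← List.isPrefixOf_iff_prefix]
                obtain ⟨t', ht'⟩ := hpre
                have hk : c :: t = "union".toList ++ t' := ht'.symm
                rw [match_step c t t' "union".toList "uni'+'on".toList "uni'+'".toList "on".toList
                  (passesA.take 5) (passesA.drop 6) rfl hk (by decide) rfl (by decide) (by decide) (by decide) (by decide)]
                rw [ih ("on".toList ++ t') (by
                  have hlen := congrArg List.length hk
                  simp only [List.length_cons, List.length_append] at hlen ⊢
                  have e1 : ("union".toList).length = 5 := by decide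
                  have e2 : ("on".toList).length = 2 := by decide
                  rw [e1] at hlen
                  rw [e2]
                  omega)]
                rw [scanB_eval c t t' "union".toList "uni".toList hk (by decide) (find_union c t t' hk)]
                rfl
              ·
                by_cases h_script : ("script".toList).isPrefixOf (c :: t) = true
                · have hpre : "script".toList <+: c :: t := by rwa [← List.isPrefixOf_iff_prefix]
                  obtain ⟨t', ht'⟩ := hpre
                  have hk : c :: t = "script".toList ++ t' := ht'.symm
                  rw [match_step c t t' "script".toList "scr'+'ipt".toList "scr'+'".toList "ipt".toList
                    (passesA.take 6) (passesA.drop 7) rfl hk (by decide) rfl (by decide) (by decide) (by decide) (by decide)]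
                  rw [ih ("ipt".toList ++ t') (by
                    have hlen := congrArg List.length hk
                    simp only [List.length_cons, List.length_append] at hlen ⊢
                    have e1 : ("script".toList).length = 6 := by decide
                    have e2 : ("ipt".toList).length = 3 := by decide
                    rw [e1] at hlen
                    rw [e2]
                    omega)]
                  rw [scanB_eval c t t' "script".toList "scr".toList hk (by decide) (find_script c t t' hk)]
                  rfl
                ·
                  by_cases h_alert : ("alert".toList).isPrefixOf (c :: t) = true
                  · have hpre : "alert".toList <+: c :: t := by rwa [← List.isPrefixOf_iff_prefix]
                    obtain ⟨t', ht'⟩ := hpre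
                    have hk : c :: t = "alert".toList ++ t' := ht'.symm
                    rw [match_step c t t' "alert".toList "al'+'ert".toList "al'+'".toList "ert".toList
                      (passesA.take 8) (passesA.drop 9) rfl hk (by decide) rfl (by decide) (by decide) (by decide) (by decide)]
                    rw [ih ("ert".toList ++ t') (by
                      have hlen := congrArg List.length hk
                      simp only [List.length_cons, List.length_append] at hlen ⊢
                      have e1 : ("alert".toList).length = 5 := by decide
                      have e2 : ("ert".toList).length = 3 := by decide
                      rw [e1] at hlen
                      rw [e2]
                      omega)]
                    rw [scanB_eval c t t' "alert".toList "al".toList hk (by decide) (find_alert c t t' hk)]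
                    rfl
                  ·
                    by_cases h_onerror : ("onerror".toList).isPrefixOf (c :: t) = true
                    · have hpre : "onerror".toList <+: c :: t := by rwa [← List.isPrefixOf_iff_prefix]
                      obtain ⟨t', ht'⟩ := hpre
                      have hk : c :: t = "onerror".toList ++ t' := ht'.symm
                      rw [match_step c t t' "onerror".toList "oner'+'ror".toList "oner'+'".toList "ror".toList
                        (passesA.take 10) (passesA.drop 11) rfl hk (by decide) rfl (by decide) (by decide) (by decide) (by decide)]
                      rw [ih ("ror".toList ++ t') (by
                        have hlen := congrArg List.length hk
                        simp only [List.length_cons, List.length_append] at hlen ⊢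
                        have e1 : ("onerror".toList).length = 7 := by decide
                        have e2 : ("ror".toList).length = 3 := by decide
                        rw [e1] at hlen
                        rw [e2]
                        omega)]
                      rw [scanB_eval c t t' "onerror".toList "oner".toList hk (by decide) (find_onerror c t t' hk)]
                      rfl
                    ·
                      have hkw : ∀ k ∈ kwsL, k.isPrefixOf (c :: t) = false := by
                        intro k hkm
                        simp only [kwsL, List.mem_cons, List.not_mem_nil, or_false] at hkm
                        rcases hkm with rfl | rfl | rfl | rfl | rfl | rfl | rfl | rfl
                        · exact Bool.eq_false_iff.mpr h_admin
                        · exact Bool.eq_false_iff.mpr h_SELECT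
                        · exact Bool.eq_false_iff.mpr h_select
                        · exact Bool.eq_false_iff.mpr h_UNION
                        · exact Bool.eq_false_iff.mpr h_union
                        · exact Bool.eq_false_iff.mpr h_script
                        · exact Bool.eq_false_iff.mpr h_alert
                        · exact Bool.eq_false_iff.mpr h_onerror
                      rw [chainR_nomatch kwsL passesA c t (by decide) hkw t (fun w _ h => h)]
                      rw [scanB_nomatch c t (find_none c t hkw)]
                      rw [ih t (by omega)]

-- ===== VERDICT (by name: the statement is the Claim_ definition above) =====
theorem concat_string_py_spec : Claim_equal_concat_string_py := by
  unfold Claim_equal_concat_string_py Spec_concat_string_py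
  intro payload _
  unfold concat_string_py_alt
  rw [← chain_eq_scan payload.toList.length payload.toList le_rfl, ← portA_eq_chain payload,
    String.ofList_toList]
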